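-- pv_equiv track=rewrite | github.com/hkust-nlp/model-task-align-rl | SynLogic/games/tasks/campsite/scripts/campsite_verifier.py | _check_tent_tree_matching
-- ===== SOURCE A (Python) =====
-- from typing import List, Set, Tuple, Dict
--
-- def _check_tent_tree_matching(grid: List[List[str]]) -> bool:
--     """
--     检查帐篷与树木的一一匹配关系:
--     1. 每个帐篷必须与一棵树正交相邻
--     2. 每棵树只能与一个帐篷匹配
--     3. 每个帐篷只能与一棵树匹配
--     4. 帐篷和树的数量必须相等
--     """
--     n = len(grid)
--     m = len(grid[0]) if n > 0 else 0
--
--     tents = []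
--     trees = []
--     for i in range(n):
--         for j in range(m):
--             if grid[i][j] == 'C':
--                 tents.append((i, j))
--             elif grid[i][j] == 'T':
--                 trees.append((i, j))
--
--     if len(tents) != len(trees):
--         return False
--
--     tent_to_trees = {}
--     tree_to_tents = {}
--
--     for tent_i, tent_j in tents:
--         tent_to_trees[(tent_i, tent_j)] = []
--         for di, dj in [(0, 1), (1, 0), (0, -1), (-1, 0)]:
--             tree_i, tree_j = tent_i + di, tent_j + dj
--             if 0 <= tree_i < n and 0 <= tree_j < m and grid[tree_i][tree_j] == 'T':
--                 tent_to_trees[(tent_i, tent_j)].append((tree_i, tree_j))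
--
--     for tree_i, tree_j in trees:
--         tree_to_tents[(tree_i, tree_j)] = []
--         for di, dj in [(0, 1), (1, 0), (0, -1), (-1, 0)]:
--             tent_i, tent_j = tree_i + di, tree_j + dj
--             if 0 <= tent_i < n and 0 <= tent_j < m and grid[tent_i][tent_j] == 'C':
--                 tree_to_tents[(tree_i, tree_j)].append((tent_i, tent_j))
--
--     for tent in tents:
--         if not tent_to_trees[tent]:
--             return False
--
--     tent_matched = {}
--     tree_matched = {}
--
--     def dfs(tent):
--         for tree in tent_to_trees[tent]:
--             if tree in visited:
--                 continue
--             visited.add(tree)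
--
--             if tree not in tree_matched or dfs(tree_matched[tree]):
--                 tent_matched[tent] = tree
--                 tree_matched[tree] = tent
--                 return True
--         return False
--
--     for tent in tents:
--         visited = set()
--         if tent not in tent_matched:
--             if not dfs(tent):
--                 return False
--
--     return len(tent_matched) == len(tents) and len(tree_matched) == len(trees)
-- ===== SOURCE B (Python) =====
-- def _check_tent_tree_matching(grid):
--     n = len(grid)
--     m = len(grid[0]) if n > 0 else 0
--
--     tents = []
--     trees = set()
--     for i, row in enumerate(grid):
--         for j, ch in enumerate(row[:m]):
--             if ch == 'C':
--                 tents.append((i, j))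
--             elif ch == 'T':
--                 trees.add((i, j))
--     if len(tents) != len(trees):
--         return False
--
--     def nbrs(p):
--         i, j = p
--         return [q for q in ((i, j + 1), (i + 1, j), (i, j - 1), (i - 1, j))
--                 if q in trees]
--
--     owner = {}  # tree -> tent currently holding it
--     for tent in tents:
--         # iterative augmenting-path search, explicit stack of (tent, candidates)
--         seen = set()
--         stack = [(tent, nbrs(tent))]
--         links = []       # links[k] = tree connecting stack[k] to stack[k+1]
--         hit = None
--         while stack and hit is None:
--             top, cand = stack[-1]
--             if not cand:
--                 stack.pop()
--                 if links:
--                     links.pop()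
--                 continue
--             q = cand[0]
--             stack[-1] = (top, cand[1:])
--             if q in seen:
--                 continue
--             seen.add(q)
--             if q in owner:
--                 links.append(q)
--                 stack.append((owner[q], nbrs(owner[q])))
--             else:
--                 hit = q
--         if hit is None:
--             return False
--         # augment: reassign trees along the path, deepest first
--         owner[hit] = stack[-1][0]
--         for k in range(len(links) - 1, -1, -1):
--             owner[links[k]] = stack[k][0]
--     return True
-- ===== Notes on version B (the rewrite author's own statement) =====
-- stated objective: alternative
-- what changed: replaces A's two index-range scans, two precomputed adjacency dicts, tent_matched/tree_matched double bookkeeping, empty-neighbour pre-pass and recursive DFS by an enumerate-based single gather into a tent list plus a tree coordinate set, on-demand neighbour generation by set membership (no grid indexing or bounds checks after the scan), and an iterative explicit-stack augmenting-path search maintaining one tree-to-tent owner dict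
import Mathlib
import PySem

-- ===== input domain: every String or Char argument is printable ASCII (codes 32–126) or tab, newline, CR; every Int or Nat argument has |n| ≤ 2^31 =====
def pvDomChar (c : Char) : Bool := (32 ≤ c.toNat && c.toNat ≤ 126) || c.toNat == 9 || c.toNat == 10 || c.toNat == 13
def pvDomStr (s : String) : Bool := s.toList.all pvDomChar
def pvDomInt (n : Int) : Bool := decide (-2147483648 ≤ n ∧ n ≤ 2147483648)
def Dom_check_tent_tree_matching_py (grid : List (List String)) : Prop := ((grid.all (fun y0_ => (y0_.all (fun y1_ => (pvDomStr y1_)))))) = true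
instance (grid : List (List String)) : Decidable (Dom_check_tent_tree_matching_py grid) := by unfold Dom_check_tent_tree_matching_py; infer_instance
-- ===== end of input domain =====

-- B replaces A's two index-range scans, precomputed adjacency dicts, double tent/tree bookkeeping
-- and recursive DFS by one enumerate-based gather into a tent list plus a tree coordinate set,
-- on-demand membership-based neighbour generation, and an iterative explicit-stack augmenting-path
-- search keeping a single tree-to-tent owner dict (alternative decomposition, same cost).

-- ===== PORT A =====
-- A's grid cell access grid[i][j] and its direction list
def pvCell (grid : List (List String)) (i j : Int) : String :=
  (PySem.List.pyGet? ((PySem.List.pyGet? grid i).getD []) j).getD ""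

def pvDirs : List (Int × Int) := [(0, 1), (1, 0), (0, -1), (-1, 0)]

-- termination measure for A's augmenting search: number of not-yet-visited trees
def pvMu (trees : List (Int × Int)) (v : PySem.Set (Int × Int)) : Nat :=
  trees.countP (fun x => !(PySem.Set.contains v x))

theorem pvMu_le_of_sub (trees : List (Int × Int)) (v w : PySem.Set (Int × Int))
    (h : ∀ x ∈ v, x ∈ w) : pvMu trees w ≤ pvMu trees v := by
  unfold pvMu
  apply List.countP_mono_left
  intro x _ hx
  simp only [Bool.not_eq_eq_eq_not, Bool.not_true, ← Bool.not_eq_true,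
    PySem.Set.contains_iff] at *
  exact fun hv => hx (h x hv)

theorem pvMu_add_lt (trees : List (Int × Int)) (v : PySem.Set (Int × Int)) (r : Int × Int)
    (hr : r ∈ trees) (hv : r ∉ v) : pvMu trees (PySem.Set.add v r) < pvMu trees v := by
  have hsub : ∀ x : Int × Int, (!PySem.Set.contains (PySem.Set.add v r) x) = true →
      (!PySem.Set.contains v x) = true := by
    intro x hx
    simp only [Bool.not_eq_eq_eq_not, Bool.not_true, ← Bool.not_eq_true,
      PySem.Set.contains_iff, PySem.Set.mem_add] at *
    exact fun h => hx (Or.inl h)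
  unfold pvMu
  induction trees with
  | nil => cases hr
  | cons a ts ih =>
    simp only [List.countP_cons]
    rcases List.mem_cons.mp hr with hr | hr
    · subst hr
      have h1 : (!PySem.Set.contains v r) = true := by
        simp [PySem.Set.contains_iff, hv]
      have h2 : (!PySem.Set.contains (PySem.Set.add v r) r) = false := by
        simp [PySem.Set.contains_iff, PySem.Set.mem_add]
      have h3 := List.countP_mono_left (l := ts) (fun x _ => hsub x)
      simp only [h1, h2, Bool.false_eq_true, if_false, if_true]
      omega
    · have := ih hr
      have h3 : ∀ b : Bool, ∀ c : Bool, (c = true → b = true) →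
          (if c = true then 1 else 0) ≤ (if b = true then 1 else 0) := by
        intro b c h; cases c <;> cases b <;> simp_all
      have := h3 (!PySem.Set.contains v a) (!PySem.Set.contains (PySem.Set.add v r) a) (hsub a)
      omega

theorem pvMu_add_eq_of_not_mem (trees : List (Int × Int)) (v : PySem.Set (Int × Int)) (r : Int × Int)
    (hr : r ∉ trees) : pvMu trees (PySem.Set.add v r) = pvMu trees v := by
  unfold pvMu
  apply List.countP_congr
  intro x hx
  have hxr : x ≠ r := fun h => hr (h ▸ hx)
  simp [PySem.Set.contains_iff, PySem.Set.mem_add, hxr]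

-- A's recursive dfs (Kuhn augmenting path).  The subtype result carries the fact that the
-- visited set only grows, which the well-founded recursion itself needs; pvDfsA strips it.
def pvDfsAux (adj : PySem.Dict (Int × Int) (List (Int × Int))) (trees : List (Int × Int))
    (t : Int × Int) (rem : List (Int × Int)) (v : PySem.Set (Int × Int))
    (treeM tentM : PySem.Dict (Int × Int) (Int × Int)) :
    {out : Bool × PySem.Set (Int × Int) × PySem.Dict (Int × Int) (Int × Int) ×
       PySem.Dict (Int × Int) (Int × Int) // ∀ x ∈ v, x ∈ out.2.1} :=
  match rem with
  | [] => ⟨(false, v, treeM, tentM), fun _ hx => hx⟩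
  | r :: rest =>
    if hrv : r ∈ v then pvDfsAux adj trees t rest v treeM tentM
    else
      match treeM.get? r with
      | none =>
        ⟨(true, PySem.Set.add v r, treeM.insert r t, tentM.insert t r),
         fun x hx => (PySem.Set.mem_add _ _ _).mpr (Or.inl hx)⟩
      | some u =>
        if hrt : r ∈ trees then
          let res := pvDfsAux adj trees u (adj.getD u []) (PySem.Set.add v r) treeM tentM
          if res.val.1 then
            ⟨(true, res.val.2.1, res.val.2.2.1.insert r t, res.val.2.2.2.insert t r),
             fun x hx => res.property x ((PySem.Set.mem_add _ _ _).mpr (Or.inl hx))⟩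
          else
            let res2 := pvDfsAux adj trees t rest res.val.2.1 res.val.2.2.1 res.val.2.2.2
            ⟨res2.val, fun x hx => res2.property x (res.property x ((PySem.Set.mem_add _ _ _).mpr (Or.inl hx)))⟩
        else
          let res3 := pvDfsAux adj trees t rest (PySem.Set.add v r) treeM tentM
          ⟨res3.val, fun x hx => res3.property x ((PySem.Set.mem_add _ _ _).mpr (Or.inl hx))⟩
termination_by (pvMu trees v, rem.length)
decreasing_by
  · exact Prod.Lex.right _ (by simp)
  · exact Prod.Lex.left _ _ (pvMu_add_lt trees v r hrt hrv)
  · apply Prod.Lex.left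
    exact Nat.lt_of_le_of_lt (pvMu_le_of_sub trees _ _ res.property)
      (pvMu_add_lt trees v r hrt hrv)
  · rw [pvMu_add_eq_of_not_mem trees v r hrt]
    exact Prod.Lex.right _ (by simp)

def pvDfsA (adj : PySem.Dict (Int × Int) (List (Int × Int))) (trees : List (Int × Int))
    (t : Int × Int) (rem : List (Int × Int)) (v : PySem.Set (Int × Int))
    (treeM tentM : PySem.Dict (Int × Int) (Int × Int)) :
    Bool × PySem.Set (Int × Int) × PySem.Dict (Int × Int) (Int × Int) ×
      PySem.Dict (Int × Int) (Int × Int) :=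
  (pvDfsAux adj trees t rem v treeM tentM).val

-- A's single pass collecting tents and trees
def pvScanA (grid : List (List String)) (n m : Int) : List (Int × Int) × List (Int × Int) :=
  (PySem.List.pyRange 0 n 1).foldl (fun acc i =>
    (PySem.List.pyRange 0 m 1).foldl (fun acc j =>
      if pvCell grid i j == "C" then (acc.1 ++ [(i, j)], acc.2)
      else if pvCell grid i j == "T" then (acc.1, acc.2 ++ [(i, j)]) else acc) acc) ([], [])

-- A's adjacency dict building: d[key] = [] then append matching neighbours
def pvAdjBuild (grid : List (List String)) (n m : Int) (ch : String) (keys : List (Int × Int)) :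
    PySem.Dict (Int × Int) (List (Int × Int)) :=
  keys.foldl (fun d t =>
    pvDirs.foldl (fun d dd =>
      if 0 ≤ t.1 + dd.1 ∧ t.1 + dd.1 < n ∧ 0 ≤ t.2 + dd.2 ∧ t.2 + dd.2 < m ∧
          pvCell grid (t.1 + dd.1) (t.2 + dd.2) == ch
      then d.modify t [] (fun l => l ++ [(t.1 + dd.1, t.2 + dd.2)]) else d)
      (d.insert t [])) PySem.Dict.empty

def pvLoopA (adj : PySem.Dict (Int × Int) (List (Int × Int))) (trees : List (Int × Int))
    (ts : List (Int × Int))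
    (st : Option (PySem.Dict (Int × Int) (Int × Int) × PySem.Dict (Int × Int) (Int × Int))) :
    Option (PySem.Dict (Int × Int) (Int × Int) × PySem.Dict (Int × Int) (Int × Int)) :=
  ts.foldl (fun st t =>
    match st with
    | none => none
    | some (treeM, tentM) =>
      if tentM.contains t then some (treeM, tentM)
      else
        let res := pvDfsA adj trees t (adj.getD t []) PySem.Set.empty treeM tentM
        if res.1 then some (res.2.2.1, res.2.2.2) else none) st

def check_tent_tree_matching_py (grid : List (List String)) : Bool :=
  let n : Int := PySem.List.len grid
  let m : Int := if 0 < n then PySem.List.len ((PySem.List.pyGet? grid 0).getD []) else 0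
  let s := pvScanA grid n m
  let tents := s.1
  let trees := s.2
  if tents.length ≠ trees.length then false
  else
    let adj := pvAdjBuild grid n m "T" tents
    let _treeToTents := pvAdjBuild grid n m "C" trees   -- built by A, never read afterwards
    if tents.any (fun t => adj.getD t [] == []) then false
    else
      match pvLoopA adj trees tents (some (PySem.Dict.empty, PySem.Dict.empty)) with
      | none => false
      | some (treeM, tentM) =>
        decide (tentM.size = tents.length ∧ treeM.size = trees.length)

-- ===== PORT B =====
-- B's gather: for i,row in enumerate(grid): for j,ch in enumerate(row[:m]): …
def pvGatherB (grid : List (List String)) (m : Int) :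
    List (Int × Int) × PySem.Set (Int × Int) :=
  (PySem.List.enumerate grid 0).foldl (fun acc p =>
    (PySem.List.enumerate (PySem.List.slice p.2 none (some m)) 0).foldl (fun acc q =>
      if q.2 == "C" then (acc.1 ++ [(p.1, q.1)], acc.2)
      else if q.2 == "T" then (acc.1, PySem.Set.add acc.2 (p.1, q.1)) else acc) acc)
    ([], PySem.Set.empty)

-- B's nbrs(p): the four orthogonal coordinates kept when they belong to the tree set
def pvNbrsB (trees : PySem.Set (Int × Int)) (p : Int × Int) : List (Int × Int) :=
  [(p.1, p.2 + 1), (p.1 + 1, p.2), (p.1, p.2 - 1), (p.1 - 1, p.2)].filter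
    (fun q => PySem.Set.contains trees q)

-- B's final augmentation along the stack (owner reassigned deepest link first)
def pvAugment (rest : List ((Int × Int) × List (Int × Int))) (links : List (Int × Int))
    (M : PySem.Dict (Int × Int) (Int × Int)) : PySem.Dict (Int × Int) (Int × Int) :=
  (links.zip rest).foldl (fun d p => d.insert p.1 p.2.1) M

-- termination measure for B's machine: trees not yet seen
def pvFresh (trees v : PySem.Set (Int × Int)) : Nat :=
  (trees.filter (fun x => !(PySem.Set.contains v x))).length

theorem pvFresh_eq_pvMu (trees v : PySem.Set (Int × Int)) : pvFresh trees v = pvMu trees v := by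
  simp [pvFresh, pvMu, List.countP_eq_length_filter]

theorem pvNbrsB_length_le (trees : PySem.Set (Int × Int)) (p : Int × Int) :
    (pvNbrsB trees p).length ≤ 4 := by
  have := List.length_filter_le (fun q => PySem.Set.contains trees q)
    [(p.1, p.2 + 1), (p.1 + 1, p.2), (p.1, p.2 - 1), (p.1 - 1, p.2)]
  simpa [pvNbrsB] using this

-- B's while loop: an explicit stack of (tent, remaining candidates), the link trail, seen, owner
def pvMachineB (trees : PySem.Set (Int × Int)) (stack : List ((Int × Int) × List (Int × Int)))
    (links : List (Int × Int)) (v : PySem.Set (Int × Int))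
    (M : PySem.Dict (Int × Int) (Int × Int)) :
    Bool × PySem.Dict (Int × Int) (Int × Int) :=
  match stack with
  | [] => (false, M)
  | (_, []) :: rest => pvMachineB trees rest links.tail v M
  | (t, q :: cand) :: rest =>
    if hqv : q ∈ v then pvMachineB trees ((t, cand) :: rest) links v M
    else
      match M.get? q with
      | none => (true, pvAugment rest links (M.insert q t))
      | some u =>
        if hqt : q ∈ trees then
          pvMachineB trees ((u, pvNbrsB trees u) :: (t, cand) :: rest) (q :: links)
            (PySem.Set.add v q) M
        else pvMachineB trees ((t, cand) :: rest) links (PySem.Set.add v q) M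
termination_by pvFresh trees v * 5 + (stack.map (fun f => f.2.length)).sum + stack.length
decreasing_by
  · simp
  · simp
  · have h1 := pvMu_add_lt trees v q hqt hqv
    have h2 := pvNbrsB_length_le trees u
    simp only [pvFresh_eq_pvMu] at *
    simp; omega
  · rw [pvFresh_eq_pvMu, pvFresh_eq_pvMu, pvMu_add_eq_of_not_mem trees v q hqt]; simp

def pvLoopB (trees : PySem.Set (Int × Int)) (ts : List (Int × Int))
    (st : Option (PySem.Dict (Int × Int) (Int × Int))) :
    Option (PySem.Dict (Int × Int) (Int × Int)) :=
  ts.foldl (fun st t =>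
    match st with
    | none => none
    | some M =>
      match pvMachineB trees [(t, pvNbrsB trees t)] [] PySem.Set.empty M with
      | (true, M') => some M'
      | (false, _) => none) st

def check_tent_tree_matching_py_alt (grid : List (List String)) : Bool :=
  let n : Int := PySem.List.len grid
  let m : Int := if 0 < n then PySem.List.len ((PySem.List.pyGet? grid 0).getD []) else 0
  let g := pvGatherB grid m
  if g.1.length ≠ PySem.Set.len g.2 then false
  else (pvLoopB g.2 g.1 (some PySem.Dict.empty)).isSome

-- ===== PRECONDITION & SPEC =====
-- A indexes every row at columns 0 .. len(grid[0])-1 and raises IndexError when a later row is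
-- shorter than the first; exactly those (jagged) inputs are excluded — A returns on all others.
def Pre_check_tent_tree_matching_py (grid : List (List String)) : Prop :=
  ∀ row ∈ grid, (match grid with | [] => 0 | r :: _ => r.length) ≤ row.length
instance (grid : List (List String)) : Decidable (Pre_check_tent_tree_matching_py grid) := by
  unfold Pre_check_tent_tree_matching_py; infer_instance

def pvWitness_check_tent_tree_matching_py : List (List String) := [["C", "T"], [".", "."]]

def Spec_check_tent_tree_matching_py (grid : List (List String)) (out : Bool) : Prop :=
  out = check_tent_tree_matching_py_alt grid
instance (grid : List (List String)) (out : Bool) :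
    Decidable (Spec_check_tent_tree_matching_py grid out) := by
  unfold Spec_check_tent_tree_matching_py; infer_instance

-- ===== CLAIM (what is proved, stated in full; the proofs are below) =====
def Claim_equal_check_tent_tree_matching_py : Prop :=
  ∀ (grid : List (List String)), Dom_check_tent_tree_matching_py grid →
    Pre_check_tent_tree_matching_py grid →
    Spec_check_tent_tree_matching_py grid (check_tent_tree_matching_py grid)

-- ===== LEMMAS AND PROOFS =====

-- closed form of A's per-tent neighbour list (proof-only helper)
def pvNbrs (grid : List (List String)) (n m : Int) (t : Int × Int) : List (Int × Int) :=
  (pvDirs.filter (fun dd => decide (0 ≤ t.1 + dd.1 ∧ t.1 + dd.1 < n ∧ 0 ≤ t.2 + dd.2 ∧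
      t.2 + dd.2 < m ∧ pvCell grid (t.1 + dd.1) (t.2 + dd.2) == "T"))).map
    (fun dd => (t.1 + dd.1, t.2 + dd.2))

-- B's comprehension-style reading of the scan (proof-only helper)
def pvComp (grid : List (List String)) (n m : Int) (ch : String) : List (Int × Int) :=
  (PySem.List.pyRange 0 n 1).flatMap (fun i =>
    ((PySem.List.pyRange 0 m 1).filter (fun j => pvCell grid i j == ch)).map (fun j => (i, j)))

theorem pvMem_comp (grid : List (List String)) (n m : Int) (ch : String) (t : Int × Int) :
    t ∈ pvComp grid n m ch ↔
      (0 ≤ t.1 ∧ t.1 < n ∧ 0 ≤ t.2 ∧ t.2 < m ∧ pvCell grid t.1 t.2 == ch) := by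
  unfold pvComp
  simp only [List.mem_flatMap, List.mem_map, List.mem_filter, PySem.List.mem_pyRange_one]
  constructor
  · rintro ⟨i, ⟨hi0, hin⟩, j, ⟨⟨hj0, hjm⟩, hc⟩, rfl⟩
    exact ⟨hi0, hin, hj0, hjm, hc⟩
  · rintro ⟨h1, h2, h3, h4, h5⟩
    exact ⟨t.1, ⟨h1, h2⟩, t.2, ⟨⟨h3, h4⟩, h5⟩, (by simp)⟩

theorem pvNodup_comp (grid : List (List String)) (n m : Int) (ch : String) :
    (pvComp grid n m ch).Nodup := by
  unfold pvComp
  rw [List.nodup_flatMap]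
  constructor
  · intro i _
    exact ((PySem.List.nodup_pyRange_one 0 m).filter _).map
      (fun a b h => by simpa using congrArg Prod.snd h)
  · refine (PySem.List.nodup_pyRange_one 0 n).imp ?_
    intro i i' hne x hx hx'
    simp only [List.mem_map, List.mem_filter] at hx hx'
    obtain ⟨j, -, rfl⟩ := hx
    obtain ⟨j', -, h⟩ := hx'
    exact hne (by simpa using congrArg Prod.fst h.symm)

-- B's membership neighbours agree with A's bounds-checked neighbours
theorem pvNbrsB_eq_pvNbrs (grid : List (List String)) (n m : Int) (p : Int × Int) :
    pvNbrsB (pvComp grid n m "T") p = pvNbrs grid n m p := by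
  unfold pvNbrsB pvNbrs pvDirs
  simp only [List.filter_cons, List.filter_nil, PySem.Set.contains_iff, pvMem_comp,
    decide_eq_true_eq, apply_ite (List.map (fun dd : Int × Int => (p.1 + dd.1, p.2 + dd.2))),
    List.map_cons, List.map_nil, add_zero, sub_eq_add_neg]

-- A's scan produces exactly B's two comprehensions
theorem pvScanA_eq (grid : List (List String)) (n m : Int) :
    pvScanA grid n m = (pvComp grid n m "C", pvComp grid n m "T") := by
  have hinner : ∀ (i : Int) (js : List Int) (acc : List (Int × Int) × List (Int × Int)),
      js.foldl (fun acc j =>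
        if pvCell grid i j == "C" then (acc.1 ++ [(i, j)], acc.2)
        else if pvCell grid i j == "T" then (acc.1, acc.2 ++ [(i, j)]) else acc) acc
      = (acc.1 ++ (js.filter (fun j => pvCell grid i j == "C")).map (fun j => (i, j)),
         acc.2 ++ (js.filter (fun j => pvCell grid i j == "T")).map (fun j => (i, j))) := by
    intro i js
    induction js with
    | nil => intro acc; simp
    | cons j js ih =>
      intro acc
      rw [List.foldl_cons, List.filter_cons, List.filter_cons]
      cases h1 : pvCell grid i j == "C" with
      | true =>
        have h2 : (pvCell grid i j == "T") = false := by
          rw [show pvCell grid i j = "C" from by simpa using h1]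
          decide
        simp only [h1, h2, if_true, if_false, Bool.false_eq_true, eq_self_iff_true]
        rw [ih]
        simp
      | false =>
        cases h2 : pvCell grid i j == "T" with
        | true =>
          simp only [h1, h2, if_true, if_false, Bool.false_eq_true, eq_self_iff_true]
          rw [ih]
          simp
        | false =>
          simp only [h1, h2, if_false, Bool.false_eq_true]
          rw [ih]
  have houter : ∀ (is : List Int) (acc : List (Int × Int) × List (Int × Int)),
      is.foldl (fun acc i => (PySem.List.pyRange 0 m 1).foldl (fun acc j =>
        if pvCell grid i j == "C" then (acc.1 ++ [(i, j)], acc.2)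
        else if pvCell grid i j == "T" then (acc.1, acc.2 ++ [(i, j)]) else acc) acc) acc
      = (acc.1 ++ is.flatMap (fun i => (((PySem.List.pyRange 0 m 1).filter
            (fun j => pvCell grid i j == "C")).map (fun j => (i, j)))),
         acc.2 ++ is.flatMap (fun i => (((PySem.List.pyRange 0 m 1).filter
            (fun j => pvCell grid i j == "T")).map (fun j => (i, j))))) := by
    intro is
    induction is with
    | nil => intro acc; simp
    | cons i is ih =>
      intro acc
      rw [List.foldl_cons, hinner, ih]
      simp
  unfold pvScanA pvComp
  rw [houter]
  simp

-- B's gather produces the same two collections (the tree set's element list is exactly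
-- A's tree list, in order)
theorem pvFlatMap_congr {α β : Type} (l : List α) (f g : α → List β)
    (h : ∀ x ∈ l, f x = g x) : l.flatMap f = l.flatMap g := by
  induction l with
  | nil => rfl
  | cons x xs ih =>
    rw [List.flatMap_cons, List.flatMap_cons, h x List.mem_cons_self,
      ih (fun y hy => h y (List.mem_cons_of_mem _ hy))]

theorem pvGatherB_inner (i : Int) (cells : List String) :
    ∀ (s : Int) (acc : List (Int × Int) × PySem.Set (Int × Int)),
      (∀ j : Int, s ≤ j → (i, j) ∉ acc.2) →
      (PySem.List.enumerate cells s).foldl (fun acc q =>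
          if q.2 == "C" then (acc.1 ++ [(i, q.1)], acc.2)
          else if q.2 == "T" then (acc.1, PySem.Set.add acc.2 (i, q.1)) else acc) acc
      = (acc.1 ++ ((PySem.List.enumerate cells s).filter (fun q => q.2 == "C")).map
            (fun q => (i, q.1)),
         acc.2 ++ ((PySem.List.enumerate cells s).filter (fun q => q.2 == "T")).map
            (fun q => (i, q.1))) := by
  induction cells with
  | nil => intro s acc _; simp [PySem.List.enumerate_nil]
  | cons c cs ih =>
    intro s acc hfresh
    rw [PySem.List.enumerate_cons, List.foldl_cons, List.filter_cons, List.filter_cons]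
    cases h1 : ((s, c) : Int × String).2 == "C" with
    | true =>
      have h2 : (((s, c) : Int × String).2 == "T") = false := by
        simp only at h1 ⊢
        rw [show c = "C" from by simpa using h1]
        decide
      simp only [h1, h2, if_true, if_false, Bool.false_eq_true]
      rw [ih (s + 1) _ (by intro j hj; exact hfresh j (by omega))]
      simp
    | false =>
      cases h2 : ((s, c) : Int × String).2 == "T" with
      | true =>
        simp only [h1, h2, if_true, if_false, Bool.false_eq_true]
        have hadd : PySem.Set.add acc.2 (i, s) = acc.2 ++ [(i, s)] := by
          rw [PySem.Set.add]
          simp only [← Bool.not_eq_true, PySem.Set.contains_iff]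
          simp [hfresh s le_rfl]
        rw [ih (s + 1) ((acc.1, PySem.Set.add acc.2 (i, s)) :
            List (Int × Int) × PySem.Set (Int × Int)) (by
          intro j hj
          rw [hadd]
          simp only [List.mem_append, List.mem_singleton]
          rintro (h | h)
          · exact hfresh j (by omega) h
          · have h' : j = s := by simpa using h
            omega)]
        rw [hadd]
        simp
      | false =>
        simp only [h1, h2, if_false, Bool.false_eq_true]
        exact ih (s + 1) _ (fun j hj => hfresh j (by omega))

theorem pvGatherB_outer (m : Int) : ∀ (rows : List (List String)) (s : Int)
    (acc : List (Int × Int) × PySem.Set (Int × Int)),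
    (∀ p ∈ acc.2, p.1 < s) →
    (PySem.List.enumerate rows s).foldl (fun acc p =>
      (PySem.List.enumerate (PySem.List.slice p.2 none (some m)) 0).foldl (fun acc q =>
        if q.2 == "C" then (acc.1 ++ [(p.1, q.1)], acc.2)
        else if q.2 == "T" then (acc.1, PySem.Set.add acc.2 (p.1, q.1)) else acc) acc) acc
    = (acc.1 ++ (PySem.List.enumerate rows s).flatMap (fun p =>
        ((PySem.List.enumerate (PySem.List.slice p.2 none (some m)) 0).filter
          (fun q => q.2 == "C")).map (fun q => (p.1, q.1))),
       acc.2 ++ (PySem.List.enumerate rows s).flatMap (fun p =>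
        ((PySem.List.enumerate (PySem.List.slice p.2 none (some m)) 0).filter
          (fun q => q.2 == "T")).map (fun q => (p.1, q.1)))) := by
  intro rows
  induction rows with
  | nil => intro s acc _; simp [PySem.List.enumerate_nil]
  | cons r rs ih =>
    intro s acc hacc
    rw [PySem.List.enumerate_cons, List.foldl_cons, List.flatMap_cons, List.flatMap_cons]
    dsimp only
    rw [pvGatherB_inner s (PySem.List.slice r none (some m)) 0 acc
      (by intro j _ hmem; exact absurd (hacc _ hmem) (by simp))]
    rw [ih (s + 1) _ (by
      intro p hp
      rcases List.mem_append.mp hp with h | h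
      · exact lt_trans (hacc p h) (by omega)
      · obtain ⟨q, -, rfl⟩ := List.mem_map.mp h
        simp)]
    simp

theorem pvRow_eq (grid : List (List String)) (n m : Int) (ch : String) (hm0 : 0 ≤ m)
    (hn : n = PySem.List.len grid)
    (hrect : ∀ row ∈ grid, m ≤ (row.length : Int))
    (i : Int) (hi0 : 0 ≤ i) (hin : i < n) :
    ((PySem.List.enumerate (PySem.List.slice (PySem.List.pyGetD grid i []) none (some m)) 0).filter
      (fun q => q.2 == ch)).map (fun q => (i, q.1))
    = ((PySem.List.pyRange 0 m 1).filter (fun j => pvCell grid i j == ch)).map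
        (fun j => (i, j)) := by
  have hnlen : n = (grid.length : Int) := by simpa [PySem.List.len] using hn
  have hilt : i.toNat < grid.length := by omega
  have hget : PySem.List.pyGet? grid i = some grid[i.toNat] := by
    have h1 : PySem.List.pyGet? grid ((i.toNat : Nat) : Int) = grid[i.toNat]? :=
      PySem.List.pyGet?_natCast grid i.toNat
    rw [show ((i.toNat : Nat) : Int) = i by omega, List.getElem?_eq_getElem hilt] at h1
    exact h1
  have hrowd : PySem.List.pyGetD grid i [] = grid[i.toNat] := by
    have h1 : PySem.List.pyGetD grid ((i.toNat : Nat) : Int) ([] : List String) =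
        grid.getD i.toNat [] := PySem.List.pyGetD_natCast grid i.toNat []
    rw [show ((i.toNat : Nat) : Int) = i by omega] at h1
    rw [h1, List.getD_eq_getElem?_getD, List.getElem?_eq_getElem hilt, Option.getD_some]
  have hml : m.toNat ≤ (grid[i.toNat]).length := by
    have := hrect _ (List.getElem_mem hilt)
    omega
  rw [hrowd, PySem.List.slice_to _ hm0]
  rw [PySem.List.enumerate_eq_map_pyRange _ ""]
  have hlen : PySem.List.len (List.take m.toNat grid[i.toNat]) = m := by
    simp [PySem.List.len]
    omega
  rw [hlen, List.filter_map, List.map_map]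
  have hfun : ((fun q : Int × String => (i, q.1)) ∘
      (fun j => (j, PySem.List.pyGetD (List.take m.toNat grid[i.toNat]) j ""))) =
      fun j => (i, j) := by
    funext j; rfl
  rw [hfun]
  congr 1
  apply List.filter_congr
  intro j hj
  rw [PySem.List.mem_pyRange_one] at hj
  have hjlt : j.toNat < m.toNat := by omega
  have hjr : j.toNat < (grid[i.toNat]).length := by omega
  have hgd : PySem.List.pyGetD (List.take m.toNat grid[i.toNat]) j "" =
      grid[i.toNat][j.toNat] := by
    have h1 : PySem.List.pyGetD (List.take m.toNat grid[i.toNat]) ((j.toNat : Nat) : Int) "" =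
        (List.take m.toNat grid[i.toNat]).getD j.toNat "" :=
      PySem.List.pyGetD_natCast _ j.toNat ""
    rw [show ((j.toNat : Nat) : Int) = j by omega] at h1
    rw [h1, List.getD_eq_getElem?_getD, List.getElem?_take_of_lt hjlt,
      List.getElem?_eq_getElem hjr, Option.getD_some]
  have hcell : pvCell grid i j = grid[i.toNat][j.toNat] := by
    have h2 : PySem.List.pyGet? grid[i.toNat] ((j.toNat : Nat) : Int) = grid[i.toNat][j.toNat]? :=
      PySem.List.pyGet?_natCast _ j.toNat
    rw [show ((j.toNat : Nat) : Int) = j by omega, List.getElem?_eq_getElem hjr] at h2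
    rw [pvCell, hget, Option.getD_some, h2, Option.getD_some]
  simp only [Function.comp_apply, hgd, hcell]
theorem pvGatherB_eq (grid : List (List String)) (n m : Int)
    (hn : n = PySem.List.len grid) (hm0 : 0 ≤ m)
    (hrect : ∀ row ∈ grid, m ≤ (row.length : Int)) :
    pvGatherB grid m = (pvComp grid n m "C", pvComp grid n m "T") := by
  unfold pvGatherB
  rw [pvGatherB_outer m grid 0 ([], PySem.Set.empty)
    (by intro p hp; exact absurd hp (by simp [PySem.Set.empty]))]
  have key : ∀ ch : String, (PySem.List.enumerate grid 0).flatMap (fun p =>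
      ((PySem.List.enumerate (PySem.List.slice p.2 none (some m)) 0).filter
        (fun q => q.2 == ch)).map (fun q => (p.1, q.1)))
      = pvComp grid n m ch := by
    intro ch
    rw [PySem.List.enumerate_eq_map_pyRange grid [], List.flatMap_map]
    unfold pvComp
    rw [← hn]
    apply pvFlatMap_congr
    intro i hi
    rw [PySem.List.mem_pyRange_one] at hi
    exact pvRow_eq grid n m ch hm0 hn hrect i hi.1 hi.2
  rw [key "C", key "T"]
  simp [PySem.Set.empty]

theorem pvAdjBuild_getD (grid : List (List String)) (n m : Int) (keys : List (Int × Int))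
    (hnd : keys.Nodup) (t : Int × Int) (ht : t ∈ keys) :
    (pvAdjBuild grid n m "T" keys).getD t [] = pvNbrs grid n m t := by
  have hpreserve : ∀ (k : Int × Int), t ≠ k → ∀ (dds : List (Int × Int))
      (d : PySem.Dict (Int × Int) (List (Int × Int))),
      (dds.foldl (fun d dd =>
        if 0 ≤ k.1 + dd.1 ∧ k.1 + dd.1 < n ∧ 0 ≤ k.2 + dd.2 ∧ k.2 + dd.2 < m ∧
            pvCell grid (k.1 + dd.1) (k.2 + dd.2) == "T"
        then d.modify k [] (fun l => l ++ [(k.1 + dd.1, k.2 + dd.2)]) else d) d).getD t []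
      = d.getD t [] := by
    intro k hk dds
    induction dds with
    | nil => intro d; rfl
    | cons dd dds ih =>
      intro d
      rw [List.foldl_cons]
      split
      · rw [ih, PySem.Dict.getD_modify_of_ne _ _ _ hk]
      · rw [ih]
  have hstep : ∀ (k : Int × Int) (d : PySem.Dict (Int × Int) (List (Int × Int))), t ≠ k →
      ((pvDirs.foldl (fun d dd =>
        if 0 ≤ k.1 + dd.1 ∧ k.1 + dd.1 < n ∧ 0 ≤ k.2 + dd.2 ∧ k.2 + dd.2 < m ∧
            pvCell grid (k.1 + dd.1) (k.2 + dd.2) == "T"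
        then d.modify k [] (fun l => l ++ [(k.1 + dd.1, k.2 + dd.2)]) else d) (d.insert k []))).getD t []
      = d.getD t [] := by
    intro k d hk
    rw [hpreserve k hk, PySem.Dict.getD_insert_of_ne _ _ _ hk]
  have hself : ∀ (dds : List (Int × Int)) (d : PySem.Dict (Int × Int) (List (Int × Int)))
      (acc : List (Int × Int)), d.getD t [] = acc →
      (dds.foldl (fun d dd =>
        if 0 ≤ t.1 + dd.1 ∧ t.1 + dd.1 < n ∧ 0 ≤ t.2 + dd.2 ∧ t.2 + dd.2 < m ∧
            pvCell grid (t.1 + dd.1) (t.2 + dd.2) == "T"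
        then d.modify t [] (fun l => l ++ [(t.1 + dd.1, t.2 + dd.2)]) else d) d).getD t []
      = dds.foldl (fun out dd =>
        if 0 ≤ t.1 + dd.1 ∧ t.1 + dd.1 < n ∧ 0 ≤ t.2 + dd.2 ∧ t.2 + dd.2 < m ∧
            pvCell grid (t.1 + dd.1) (t.2 + dd.2) == "T"
        then out ++ [(t.1 + dd.1, t.2 + dd.2)] else out) acc := by
    intro dds
    induction dds with
    | nil => intro d acc h; simpa using h
    | cons dd dds ih =>
      intro d acc h
      rw [List.foldl_cons, List.foldl_cons]
      split
      · exact ih _ _ (by rw [PySem.Dict.getD_modify_self, h])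
      · exact ih _ _ h
  have main : ∀ (ks : List (Int × Int)) (d : PySem.Dict (Int × Int) (List (Int × Int))),
      ks.Nodup → t ∈ ks →
      (ks.foldl (fun d k =>
        pvDirs.foldl (fun d dd =>
          if 0 ≤ k.1 + dd.1 ∧ k.1 + dd.1 < n ∧ 0 ≤ k.2 + dd.2 ∧ k.2 + dd.2 < m ∧
              pvCell grid (k.1 + dd.1) (k.2 + dd.2) == "T"
          then d.modify k [] (fun l => l ++ [(k.1 + dd.1, k.2 + dd.2)]) else d)
          (d.insert k [])) d).getD t []
      = pvNbrs grid n m t := by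
    intro ks
    induction ks with
    | nil => intro d _ h; cases h
    | cons k ks ih =>
      intro d hk ht
      rw [List.foldl_cons]
      rcases List.mem_cons.mp ht with rfl | ht'
      · have htks : t ∉ ks := (List.nodup_cons.mp hk).1
        have huntouched : ∀ (d' : PySem.Dict (Int × Int) (List (Int × Int))),
            (ks.foldl (fun d k =>
              pvDirs.foldl (fun d dd =>
                if 0 ≤ k.1 + dd.1 ∧ k.1 + dd.1 < n ∧ 0 ≤ k.2 + dd.2 ∧ k.2 + dd.2 < m ∧
                    pvCell grid (k.1 + dd.1) (k.2 + dd.2) == "T"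
                then d.modify k [] (fun l => l ++ [(k.1 + dd.1, k.2 + dd.2)]) else d)
                (d.insert k [])) d').getD t [] = d'.getD t [] := by
          intro d'
          clear ih ht hk
          induction ks generalizing d' with
          | nil => rfl
          | cons k2 ks2 ih2 =>
            have hk2 : t ≠ k2 := fun h => htks (h ▸ List.mem_cons_self)
            rw [List.foldl_cons, ih2 (fun h => htks (List.mem_cons_of_mem _ h)), hstep k2 _ hk2]
        have hnb : pvNbrs grid n m t =
            pvDirs.foldl (fun out dd =>
              if 0 ≤ t.1 + dd.1 ∧ t.1 + dd.1 < n ∧ 0 ≤ t.2 + dd.2 ∧ t.2 + dd.2 < m ∧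
                  pvCell grid (t.1 + dd.1) (t.2 + dd.2) == "T"
              then out ++ [(t.1 + dd.1, t.2 + dd.2)] else out) [] := by
          rw [pvNbrs, PySem.List.foldl_append_ite]
          simp
        rw [huntouched, hself pvDirs _ [] (by simp [PySem.Dict.getD_insert_self]), ← hnb]
      · exact ih _ (List.nodup_cons.mp hk).2 ht'
  exact main keys PySem.Dict.empty hnd ht

-- unfolding equations for the two recursions
theorem pvDfsA_nil (adj : PySem.Dict (Int × Int) (List (Int × Int))) (trees : List (Int × Int))
    (t : Int × Int) (v : PySem.Set (Int × Int)) (M T : PySem.Dict (Int × Int) (Int × Int)) :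
    pvDfsA adj trees t [] v M T = (false, v, M, T) := by
  unfold pvDfsA pvDfsAux
  rfl

theorem pvDfsA_cons (adj : PySem.Dict (Int × Int) (List (Int × Int))) (trees : List (Int × Int))
    (t r : Int × Int) (rest : List (Int × Int)) (v : PySem.Set (Int × Int))
    (M T : PySem.Dict (Int × Int) (Int × Int)) :
    pvDfsA adj trees t (r :: rest) v M T =
      (if r ∈ v then pvDfsA adj trees t rest v M T
      else
        match M.get? r with
        | none => (true, PySem.Set.add v r, M.insert r t, T.insert t r)
        | some u =>
          if r ∈ trees then
            (let res := pvDfsA adj trees u (adj.getD u []) (PySem.Set.add v r) M T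
            if res.1 then (true, res.2.1, res.2.2.1.insert r t, res.2.2.2.insert t r)
            else pvDfsA adj trees t rest res.2.1 res.2.2.1 res.2.2.2)
          else pvDfsA adj trees t rest (PySem.Set.add v r) M T) := by
  conv_lhs => rw [pvDfsA, pvDfsAux]
  by_cases hrv : r ∈ v
  · simp [hrv, pvDfsA]
  · simp only [hrv, dite_false, dif_neg, not_false_iff]
    cases hM : M.get? r with
    | none => simp [hM]
    | some u =>
      simp only [hM]
      by_cases hrt : r ∈ trees
      · simp only [hrt, dite_true, if_true, dif_pos]
        by_cases hres : (pvDfsAux adj trees u (adj.getD u []) (PySem.Set.add v r) M T).val.1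
        · simp [hres, pvDfsA]
        · simp [hres, pvDfsA]
      · simp [hrt, pvDfsA]

theorem pvMachineB_nil (trees : PySem.Set (Int × Int)) (links : List (Int × Int))
    (v : PySem.Set (Int × Int)) (M : PySem.Dict (Int × Int) (Int × Int)) :
    pvMachineB trees [] links v M = (false, M) := by
  unfold pvMachineB
  rfl

theorem pvMachineB_pop (trees : PySem.Set (Int × Int)) (t : Int × Int)
    (rest : List ((Int × Int) × List (Int × Int))) (links : List (Int × Int))
    (v : PySem.Set (Int × Int)) (M : PySem.Dict (Int × Int) (Int × Int)) :
    pvMachineB trees ((t, []) :: rest) links v M = pvMachineB trees rest links.tail v M := by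
  conv_lhs => rw [pvMachineB]

theorem pvMachineB_cons (trees : PySem.Set (Int × Int)) (t q : Int × Int)
    (cand : List (Int × Int)) (rest : List ((Int × Int) × List (Int × Int)))
    (links : List (Int × Int)) (v : PySem.Set (Int × Int))
    (M : PySem.Dict (Int × Int) (Int × Int)) :
    pvMachineB trees ((t, q :: cand) :: rest) links v M =
      (if q ∈ v then pvMachineB trees ((t, cand) :: rest) links v M
      else
        match M.get? q with
        | none => (true, pvAugment rest links (M.insert q t))
        | some u =>
          if q ∈ trees then
            pvMachineB trees ((u, pvNbrsB trees u) :: (t, cand) :: rest) (q :: links)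
              (PySem.Set.add v q) M
          else pvMachineB trees ((t, cand) :: rest) links (PySem.Set.add v q) M) := by
  conv_lhs => rw [pvMachineB]
  by_cases hqv : q ∈ v
  · simp [hqv]
  · simp only [hqv, dite_false, dif_neg, not_false_iff]
    cases hM : M.get? q with
    | none => simp [hM]
    | some u =>
      simp only [hM]
      by_cases hqt : q ∈ trees
      · simp [hqt]
      · simp [hqt]

-- a failing dfs leaves both match dicts unchanged
theorem pvDfsA_fail (adj : PySem.Dict (Int × Int) (List (Int × Int))) (trees : List (Int × Int))
    (t : Int × Int) (rem : List (Int × Int)) (v : PySem.Set (Int × Int))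
    (M T : PySem.Dict (Int × Int) (Int × Int))
    (h : (pvDfsA adj trees t rem v M T).1 = false) :
    (pvDfsA adj trees t rem v M T).2.2.1 = M ∧ (pvDfsA adj trees t rem v M T).2.2.2 = T := by
  revert h
  suffices hgen : ∀ (N : Nat) (t : Int × Int) (rem : List (Int × Int)) (v : PySem.Set (Int × Int))
      (M T : PySem.Dict (Int × Int) (Int × Int)), pvMu trees v ≤ N →
      (pvDfsA adj trees t rem v M T).1 = false →
      (pvDfsA adj trees t rem v M T).2.2.1 = M ∧ (pvDfsA adj trees t rem v M T).2.2.2 = T by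
    exact hgen (pvMu trees v) t rem v M T le_rfl
  intro N
  induction N using Nat.strong_induction_on with
  | _ N ihN =>
  intro t rem
  induction rem with
  | nil =>
    intro v M T _ _
    rw [pvDfsA_nil]
    exact ⟨rfl, rfl⟩
  | cons r rest ih =>
    intro v M T hN hf
    rw [pvDfsA_cons] at hf ⊢
    by_cases hrv : r ∈ v
    · simp only [if_pos hrv] at hf ⊢
      exact ih v M T hN hf
    · simp only [if_neg hrv] at hf ⊢
      cases hM : M.get? r with
      | none => rw [hM] at hf; simp at hf
      | some u =>
        rw [hM] at hf
        dsimp only at hf ⊢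
        by_cases hrt : r ∈ trees
        · simp only [if_pos hrt] at hf ⊢
          by_cases h1 : (pvDfsA adj trees u (adj.getD u []) (PySem.Set.add v r) M T).1 = true
          · simp only [h1, if_true] at hf
            simp at hf
          · simp only [h1, if_false, Bool.false_eq_true] at hf ⊢
            have hmu : pvMu trees (PySem.Set.add v r) < pvMu trees v :=
              pvMu_add_lt trees v r hrt hrv
            have hdeep := ihN (pvMu trees (PySem.Set.add v r)) (by omega) u (adj.getD u [])
              (PySem.Set.add v r) M T le_rfl (by simpa using h1)
            rw [hdeep.1, hdeep.2] at hf ⊢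
            have hsub : ∀ x ∈ PySem.Set.add v r,
                x ∈ (pvDfsA adj trees u (adj.getD u []) (PySem.Set.add v r) M T).2.1 :=
              (pvDfsAux adj trees u (adj.getD u []) (PySem.Set.add v r) M T).property
            have hmu2 : pvMu trees (pvDfsA adj trees u (adj.getD u [])
                (PySem.Set.add v r) M T).2.1 < N :=
              lt_of_le_of_lt (pvMu_le_of_sub trees _ _ hsub) (by omega)
            exact ihN _ hmu2 t rest _ M T le_rfl hf
        · simp only [if_neg hrt] at hf ⊢
          exact ih (PySem.Set.add v r) M T
            (by rw [pvMu_add_eq_of_not_mem trees v r hrt]; exact hN) hf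

-- a successful dfs: tree keys gain exactly one fresh tree, tent keys gain t, values stay tents
theorem pvDfsA_succ (adj : PySem.Dict (Int × Int) (List (Int × Int))) (trees : List (Int × Int))
    (t : Int × Int) (rem : List (Int × Int)) (v : PySem.Set (Int × Int))
    (M T : PySem.Dict (Int × Int) (Int × Int))
    (hvals : ∀ r u, M.get? r = some u → T.contains u = true)
    (h : (pvDfsA adj trees t rem v M T).1 = true) :
    (∃ rr, M.contains rr = false ∧
      (pvDfsA adj trees t rem v M T).2.2.1.keys = M.keys ++ [rr]) ∧
    (pvDfsA adj trees t rem v M T).2.2.2.keys =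
      (if T.contains t then T.keys else T.keys ++ [t]) ∧
    (∀ r u, (pvDfsA adj trees t rem v M T).2.2.1.get? r = some u →
      (pvDfsA adj trees t rem v M T).2.2.2.contains u = true) := by
  revert h hvals
  suffices hgen : ∀ (N : Nat) (t : Int × Int) (rem : List (Int × Int)) (v : PySem.Set (Int × Int))
      (M T : PySem.Dict (Int × Int) (Int × Int)), pvMu trees v ≤ N →
      (∀ r u, M.get? r = some u → T.contains u = true) →
      (pvDfsA adj trees t rem v M T).1 = true →
      (∃ rr, M.contains rr = false ∧
        (pvDfsA adj trees t rem v M T).2.2.1.keys = M.keys ++ [rr]) ∧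
      (pvDfsA adj trees t rem v M T).2.2.2.keys =
        (if T.contains t then T.keys else T.keys ++ [t]) ∧
      (∀ r u, (pvDfsA adj trees t rem v M T).2.2.1.get? r = some u →
        (pvDfsA adj trees t rem v M T).2.2.2.contains u = true) by
    exact hgen (pvMu trees v) t rem v M T le_rfl
  intro N
  induction N using Nat.strong_induction_on with
  | _ N ihN =>
  intro t rem
  induction rem with
  | nil =>
    intro v M T _ _ hf
    rw [pvDfsA_nil] at hf
    simp at hf
  | cons r rest ih =>
    intro v M T hN hvals hf
    rw [pvDfsA_cons] at hf ⊢
    by_cases hrv : r ∈ v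
    · simp only [if_pos hrv] at hf ⊢
      exact ih v M T hN hvals hf
    · simp only [if_neg hrv] at hf ⊢
      cases hM : M.get? r with
      | none =>
        rw [hM] at hf
        dsimp only at hf ⊢
        have hMr : M.contains r = false := by
          rw [PySem.Dict.contains_eq_isSome_get?, hM]
          rfl
        refine ⟨⟨r, hMr, PySem.Dict.keys_insert_of_not_contains M t hMr⟩, ?_, ?_⟩
        · by_cases hTt : T.contains t
          · rw [if_pos hTt, PySem.Dict.keys_insert_of_contains T r hTt]
          · rw [if_neg hTt, PySem.Dict.keys_insert_of_not_contains T r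
              (Bool.not_eq_true _ ▸ hTt : T.contains t = false)]
        · intro r' u' hget
          rw [PySem.Dict.get?_insert] at hget
          rw [PySem.Dict.contains_insert]
          by_cases hr' : r' = r
          · rw [if_pos hr'] at hget
            have : u' = t := by injection hget with h; exact h.symm
            simp [this]
          · rw [if_neg hr'] at hget
            have := hvals r' u' hget
            simp [this]
      | some u =>
        rw [hM] at hf
        dsimp only at hf ⊢
        have hTu : T.contains u = true := hvals r u hM
        have hMr : M.contains r = true := by
          rw [PySem.Dict.contains_eq_isSome_get?, hM]
          rfl
        by_cases hrt : r ∈ trees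
        · simp only [if_pos hrt] at hf ⊢
          by_cases h1 : (pvDfsA adj trees u (adj.getD u []) (PySem.Set.add v r) M T).1 = true
          · simp only [h1, if_true] at hf ⊢
            have hmu : pvMu trees (PySem.Set.add v r) < pvMu trees v :=
              pvMu_add_lt trees v r hrt hrv
            obtain ⟨⟨rr, hrrfresh, hMkeys⟩, hTkeys, hvals'⟩ :=
              ihN (pvMu trees (PySem.Set.add v r)) (by omega) u (adj.getD u [])
                (PySem.Set.add v r) M T le_rfl hvals h1
            rw [if_pos hTu] at hTkeys
            have hMr' : (pvDfsA adj trees u (adj.getD u [])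
                (PySem.Set.add v r) M T).2.2.1.contains r = true := by
              rw [PySem.Dict.contains_iff_mem_keys, hMkeys]
              exact List.mem_append_left _ ((PySem.Dict.contains_iff_mem_keys M r).mp hMr)
            refine ⟨⟨rr, hrrfresh, ?_⟩, ?_, ?_⟩
            · rw [PySem.Dict.keys_insert_of_contains _ t hMr', hMkeys]
            · have hcongr : (pvDfsA adj trees u (adj.getD u [])
                  (PySem.Set.add v r) M T).2.2.2.contains t = T.contains t := by
                by_cases hTt : T.contains t = true
                · rw [hTt, (PySem.Dict.contains_iff_mem_keys _ t).mpr]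
                  rw [hTkeys]
                  exact (PySem.Dict.contains_iff_mem_keys T t).mp hTt
                · have hTt' : T.contains t = false := by
                    cases hc : T.contains t
                    · rfl
                    · exact absurd hc hTt
                  rw [hTt']
                  cases hc : (pvDfsA adj trees u (adj.getD u [])
                      (PySem.Set.add v r) M T).2.2.2.contains t
                  · rfl
                  · exfalso
                    have := (PySem.Dict.contains_iff_mem_keys _ t).mp hc
                    rw [hTkeys] at this
                    exact hTt ((PySem.Dict.contains_iff_mem_keys T t).mpr this)
              by_cases hTt : T.contains t
              · rw [if_pos hTt, PySem.Dict.keys_insert_of_contains _ r (by rw [hcongr]; exact hTt),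
                  hTkeys]
              · rw [if_neg hTt, PySem.Dict.keys_insert_of_not_contains _ r
                  (by rw [hcongr]; exact (Bool.not_eq_true _ ▸ hTt : T.contains t = false)), hTkeys]
            · intro r' u' hget
              rw [PySem.Dict.get?_insert] at hget
              rw [PySem.Dict.contains_insert]
              by_cases hr' : r' = r
              · rw [if_pos hr'] at hget
                have : u' = t := by injection hget with h; exact h.symm
                simp [this]
              · rw [if_neg hr'] at hget
                have := hvals' r' u' hget
                simp [this]
          · simp only [h1, if_false, Bool.false_eq_true] at hf ⊢
            have hmu : pvMu trees (PySem.Set.add v r) < pvMu trees v :=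
              pvMu_add_lt trees v r hrt hrv
            have hdeep := pvDfsA_fail adj trees u (adj.getD u []) (PySem.Set.add v r) M T
              (by simpa using h1)
            rw [hdeep.1, hdeep.2] at hf ⊢
            have hsub : ∀ x ∈ PySem.Set.add v r,
                x ∈ (pvDfsA adj trees u (adj.getD u []) (PySem.Set.add v r) M T).2.1 :=
              (pvDfsAux adj trees u (adj.getD u []) (PySem.Set.add v r) M T).property
            have hmu2 : pvMu trees (pvDfsA adj trees u (adj.getD u [])
                (PySem.Set.add v r) M T).2.1 < N :=
              lt_of_le_of_lt (pvMu_le_of_sub trees _ _ hsub) (by omega)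
            exact ihN _ hmu2 t rest _ M T le_rfl hvals hf
        · simp only [if_neg hrt] at hf ⊢
          exact ih (PySem.Set.add v r) M T
            (by rw [pvMu_add_eq_of_not_mem trees v r hrt]; exact hN) hvals hf

theorem pvAugment_cons (t : Int × Int) (cand : List (Int × Int))
    (rest : List ((Int × Int) × List (Int × Int))) (q : Int × Int) (links : List (Int × Int))
    (X : PySem.Dict (Int × Int) (Int × Int)) :
    pvAugment ((t, cand) :: rest) (q :: links) X = pvAugment rest links (X.insert q t) := rfl

-- the simulation: B's stack machine step-for-step equals A's recursive dfs on the top frame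
theorem pvSim (adj : PySem.Dict (Int × Int) (List (Int × Int))) (trees : PySem.Set (Int × Int)) :
    ∀ (t : Int × Int) (rem : List (Int × Int)) (rest : List ((Int × Int) × List (Int × Int)))
      (links : List (Int × Int)) (v : PySem.Set (Int × Int))
      (M T : PySem.Dict (Int × Int) (Int × Int)),
      (∀ r u, M.get? r = some u → adj.getD u [] = pvNbrsB trees u) →
      pvMachineB trees ((t, rem) :: rest) links v M =
        (if (pvDfsA adj trees t rem v M T).1 then
          (true, pvAugment rest links (pvDfsA adj trees t rem v M T).2.2.1)
        else pvMachineB trees rest links.tail (pvDfsA adj trees t rem v M T).2.1 M) := by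
  intro t rem rest links v M T Hu
  revert t rem rest links v
  suffices hgen : ∀ (N : Nat) (t : Int × Int) (rem : List (Int × Int))
      (rest : List ((Int × Int) × List (Int × Int))) (links : List (Int × Int))
      (v : PySem.Set (Int × Int)),
      pvMu trees v * 5 + ((((t, rem) :: rest).map (fun f => f.2.length)).sum
        + ((t, rem) :: rest).length) ≤ N →
      pvMachineB trees ((t, rem) :: rest) links v M =
        (if (pvDfsA adj trees t rem v M T).1 then
          (true, pvAugment rest links (pvDfsA adj trees t rem v M T).2.2.1)
        else pvMachineB trees rest links.tail (pvDfsA adj trees t rem v M T).2.1 M) by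
    intro t rem rest links v
    exact hgen _ t rem rest links v le_rfl
  intro N
  induction N using Nat.strong_induction_on with
  | _ N ihN =>
  intro t rem rest links v hΦ
  simp only [List.map_cons, List.sum_cons, List.length_cons] at hΦ
  cases rem with
  | nil =>
    rw [pvMachineB_pop, pvDfsA_nil]
    simp
  | cons q cand =>
    simp only [List.length_cons] at hΦ
    rw [pvMachineB_cons, pvDfsA_cons]
    by_cases hqv : q ∈ v
    · simp only [if_pos hqv]
      exact ihN _ (by simp only [List.map_cons, List.sum_cons, List.length_cons]; omega) t cand rest links v (le_refl _)
    · simp only [if_neg hqv]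
      cases hM : M.get? q with
      | none =>
        dsimp only
        simp
      | some u =>
        dsimp only
        by_cases hqt : q ∈ trees
        · simp only [if_pos hqt]
          rw [Hu q u hM]
          have hmu' : pvMu trees (PySem.Set.add v q) < pvMu trees v :=
            pvMu_add_lt trees v q hqt hqv
          have hnb : (pvNbrsB trees u).length ≤ 4 := pvNbrsB_length_le trees u
          have hpush := ihN (pvMu trees (PySem.Set.add v q) * 5 +
              ((((u, pvNbrsB trees u) :: (t, cand) :: rest).map (fun f => f.2.length)).sum
                + ((u, pvNbrsB trees u) :: (t, cand) :: rest).length))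
            (by simp only [List.map_cons, List.sum_cons, List.length_cons]; omega)
            u (pvNbrsB trees u) ((t, cand) :: rest) (q :: links)
            (PySem.Set.add v q) (le_refl _)
          rw [hpush]
          by_cases hd : (pvDfsA adj trees u (pvNbrsB trees u) (PySem.Set.add v q) M T).1 = true
          · simp only [hd, if_true]
            rw [pvAugment_cons]
          · simp only [hd, if_false, Bool.false_eq_true]
            have hdeep := pvDfsA_fail adj trees u (pvNbrsB trees u) (PySem.Set.add v q) M T
              (by simpa using hd)
            rw [hdeep.1, hdeep.2]
            have hsub : ∀ x ∈ PySem.Set.add v q,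
                x ∈ (pvDfsA adj trees u (pvNbrsB trees u) (PySem.Set.add v q) M T).2.1 :=
              (pvDfsAux adj trees u (pvNbrsB trees u) (PySem.Set.add v q) M T).property
            have hmu2 : pvMu trees (pvDfsA adj trees u (pvNbrsB trees u)
                (PySem.Set.add v q) M T).2.1 ≤ pvMu trees (PySem.Set.add v q) :=
              pvMu_le_of_sub trees _ _ hsub
            have hres := ihN (pvMu trees (pvDfsA adj trees u (pvNbrsB trees u)
                (PySem.Set.add v q) M T).2.1 * 5 +
              ((((t, cand) :: rest).map (fun f => f.2.length)).sum + ((t, cand) :: rest).length))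
              (by simp only [List.map_cons, List.sum_cons, List.length_cons]; omega)
              t cand rest links
              (pvDfsA adj trees u (pvNbrsB trees u) (PySem.Set.add v q) M T).2.1 (le_refl _)
            simp only [List.tail_cons]
            rw [hres]
        · simp only [if_neg hqt]
          have hmueq : pvMu trees (PySem.Set.add v q) = pvMu trees v :=
            pvMu_add_eq_of_not_mem trees v q hqt
          exact ihN (pvMu trees (PySem.Set.add v q) * 5 +
              ((((t, cand) :: rest).map (fun f => f.2.length)).sum + ((t, cand) :: rest).length))
            (by simp only [List.map_cons, List.sum_cons, List.length_cons]; omega)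
            t cand rest links (PySem.Set.add v q) (le_refl _)

theorem pvLoopA_none (adj : PySem.Dict (Int × Int) (List (Int × Int))) (trees ts : List (Int × Int)) :
    pvLoopA adj trees ts none = none := by
  induction ts with
  | nil => rfl
  | cons t ts ih => simpa [pvLoopA, List.foldl_cons] using ih

theorem pvLoopB_none (trees : PySem.Set (Int × Int)) (ts : List (Int × Int)) :
    pvLoopB trees ts none = none := by
  induction ts with
  | nil => rfl
  | cons t ts ih => simpa [pvLoopB, List.foldl_cons] using ih

-- if some tent has no adjacent tree, B's loop fails
theorem pvLoopB_empty_false (trees : PySem.Set (Int × Int)) :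
    ∀ (ts : List (Int × Int)) (M : PySem.Dict (Int × Int) (Int × Int)) (t0 : Int × Int),
      t0 ∈ ts → pvNbrsB trees t0 = [] →
      pvLoopB trees ts (some M) = none := by
  intro ts
  induction ts with
  | nil => intro M t0 h _; cases h
  | cons t ts ih =>
    intro M t0 ht h0
    have step : pvLoopB trees (t :: ts) (some M) =
        pvLoopB trees ts
          (match pvMachineB trees [(t, pvNbrsB trees t)] [] PySem.Set.empty M with
            | (true, M') => some M'
            | (false, _) => none) := rfl
    rcases List.mem_cons.mp ht with rfl | ht'
    · rw [step, h0, pvMachineB_pop, pvMachineB_nil]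
      exact pvLoopB_none trees ts
    · rw [step]
      rcases hm : pvMachineB trees [(t, pvNbrsB trees t)] [] PySem.Set.empty M with ⟨b, M'⟩
      cases b
      · exact pvLoopB_none trees ts
      · exact ih M' t0 ht' h0

-- the main loop relation, carrying A's counting invariants
theorem pvLoop_rel (adj : PySem.Dict (Int × Int) (List (Int × Int)))
    (trees tents : List (Int × Int))
    (hadj : ∀ t ∈ tents, adj.getD t [] = pvNbrsB trees t) :
    ∀ (ts pre : List (Int × Int)) (M T : PySem.Dict (Int × Int) (Int × Int)),
      pre ++ ts = tents → (pre ++ ts).Nodup →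
      T.keys = pre → M.keys.length = pre.length →
      (∀ r u, M.get? r = some u → T.contains u = true) →
      (∀ u, T.contains u = true → u ∈ tents) →
      (∃ M' T', pvLoopA adj trees ts (some (M, T)) = some (M', T') ∧
        pvLoopB trees ts (some M) = some M' ∧
        T'.keys = pre ++ ts ∧ M'.keys.length = (pre ++ ts).length) ∨
      (pvLoopA adj trees ts (some (M, T)) = none ∧
        pvLoopB trees ts (some M) = none) := by
  intro ts
  induction ts with
  | nil =>
    intro pre M T hpre hnd hTk hMl hvals hTsub
    exact Or.inl ⟨M, T, rfl, rfl, by simpa using hTk, by simpa using hMl⟩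
  | cons t ts ih =>
    intro pre M T hpre hnd hTk hMl hvals hTsub
    have httents : t ∈ tents := hpre ▸ (by simp)
    have htpre : t ∉ pre := by
      intro hmem
      exact (List.disjoint_of_nodup_append hnd) hmem List.mem_cons_self
    have hTt : T.contains t = false := by
      cases hc : T.contains t
      · rfl
      · exact absurd (hTk ▸ (PySem.Dict.contains_iff_mem_keys T t).mp hc) htpre
    have stepA : pvLoopA adj trees (t :: ts) (some (M, T)) =
        pvLoopA adj trees ts
          (if T.contains t then some (M, T)
          else
            (let res := pvDfsA adj trees t (adj.getD t []) PySem.Set.empty M T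
            if res.1 then some (res.2.2.1, res.2.2.2) else none)) := rfl
    have stepB : pvLoopB trees (t :: ts) (some M) =
        pvLoopB trees ts
          (match pvMachineB trees [(t, pvNbrsB trees t)] [] PySem.Set.empty M with
            | (true, M') => some M'
            | (false, _) => none) := rfl
    have Hu : ∀ r u, M.get? r = some u → adj.getD u [] = pvNbrsB trees u := by
      intro r u hg
      exact hadj u (hTsub u (hvals r u hg))
    have hsim := pvSim adj trees t (pvNbrsB trees t) [] [] PySem.Set.empty M T Hu
    have hadjt := hadj t httents
    rw [stepA, stepB, hadjt, hsim]
    simp only [hTt, Bool.false_eq_true, if_false]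
    by_cases h1 : (pvDfsA adj trees t (pvNbrsB trees t) PySem.Set.empty M T).1 = true
    · simp only [h1, if_true]
      have heff := pvDfsA_succ adj trees t (pvNbrsB trees t) PySem.Set.empty M T hvals h1
      obtain ⟨⟨rr, hrrf, hMk⟩, hTk', hvals'⟩ := heff
      rw [hTt] at hTk'
      simp only [Bool.false_eq_true, if_false] at hTk'
      have happ : (pre ++ [t]) ++ ts = pre ++ t :: ts := by simp
      have hih := ih (pre ++ [t])
        (pvDfsA adj trees t (pvNbrsB trees t) PySem.Set.empty M T).2.2.1
        (pvDfsA adj trees t (pvNbrsB trees t) PySem.Set.empty M T).2.2.2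
        (by rw [happ]; exact hpre) (by rw [happ]; exact hnd)
        (by rw [hTk', hTk]) (by rw [hMk]; simp [hMl])
        hvals'
        (by
          intro u hc
          have := (PySem.Dict.contains_iff_mem_keys _ u).mp hc
          rw [hTk', hTk] at this
          rcases List.mem_append.mp this with h | h
          · exact hTsub u ((PySem.Dict.contains_iff_mem_keys T u).mpr (hTk ▸ h))
          · rw [List.mem_singleton.mp h]
            exact httents)
      rw [happ] at hih
      have haug : pvAugment [] []
          (pvDfsA adj trees t (pvNbrsB trees t) PySem.Set.empty M T).2.2.1 =
          (pvDfsA adj trees t (pvNbrsB trees t) PySem.Set.empty M T).2.2.1 := rfl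
      rw [haug]
      exact hih
    · simp only [h1, if_false, Bool.false_eq_true]
      rw [pvMachineB_nil]
      exact Or.inr ⟨pvLoopA_none adj trees ts, pvLoopB_none trees ts⟩

-- ===== VERDICT (by name: the statement is the Claim_ definition above) =====
theorem check_tent_tree_matching_py_spec : Claim_equal_check_tent_tree_matching_py := by
  intro grid _ hpre
  unfold Spec_check_tent_tree_matching_py
  simp only [check_tent_tree_matching_py, check_tent_tree_matching_py_alt, pvScanA_eq]
  have hrect0 : ∀ row ∈ grid,
      (if 0 < PySem.List.len grid then PySem.List.len ((PySem.List.pyGet? grid 0).getD []) else 0)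
        ≤ (row.length : Int) := by
    intro row hrow
    cases grid with
    | nil => cases hrow
    | cons r rs =>
      have hp : r.length ≤ row.length := hpre row hrow
      have hpos : (0 : Int) < PySem.List.len (r :: rs) := by
        have h : (0 : Int) < ((r :: rs).length : Int) := by exact_mod_cast Nat.succ_pos rs.length
        simpa [PySem.List.len] using h
      rw [if_pos hpos]
      have h0 : PySem.List.pyGet? (r :: rs) (0 : Int) = some r := by
        simpa using PySem.List.pyGet?_natCast (r :: rs) 0
      rw [h0, Option.getD_some]
      have h : (r.length : Int) ≤ (row.length : Int) := by exact_mod_cast hp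
      simpa [PySem.List.len] using h
  set n : Int := PySem.List.len grid with hn
  set m : Int := (if 0 < n then PySem.List.len ((PySem.List.pyGet? grid 0).getD []) else 0) with hm
  have hrect : ∀ row ∈ grid, m ≤ (row.length : Int) := hrect0
  have hm0 : 0 ≤ m := by
    rw [hm]
    split
    · have h : (0 : Int) ≤ (((PySem.List.pyGet? grid 0).getD []).length : Int) :=
        Int.natCast_nonneg _
      simpa [PySem.List.len] using h
    · exact le_rfl
  rw [pvGatherB_eq grid n m hn hm0 hrect]
  set tents := pvComp grid n m "C" with htents
  set trees := pvComp grid n m "T" with htrees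
  set adj := pvAdjBuild grid n m "T" tents with hadjdef
  have hadj : ∀ t ∈ tents, adj.getD t [] = pvNbrsB trees t := by
    intro t ht
    rw [pvAdjBuild_getD grid n m tents (pvNodup_comp grid n m "C") t ht, htrees,
      pvNbrsB_eq_pvNbrs]
  have hslen : PySem.Set.len trees = (trees.length : Int) := by
    simp [PySem.Set.len, PySem.List.len]
  simp only [hslen, ne_eq, Nat.cast_inj]
  split_ifs with hlen1 hany
  · -- some tent has no adjacent tree: A short-circuits, B's machine fails at that tent
    obtain ⟨t0, ht0, hbeq⟩ := List.any_eq_true.mp hany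
    have hnb0 : pvNbrsB trees t0 = [] := by
      have := (beq_iff_eq).mp hbeq
      rw [← hadj t0 ht0]
      exact this
    rw [pvLoopB_empty_false trees tents PySem.Dict.empty t0 ht0 hnb0]
    rfl
  · -- main case: relate the two loops
    have hnd : ([] ++ tents).Nodup := by simpa using pvNodup_comp grid n m "C"
    have hrel := pvLoop_rel adj trees tents hadj tents [] PySem.Dict.empty
      PySem.Dict.empty (by simp) hnd PySem.Dict.keys_empty (by simp [PySem.Dict.keys_empty])
      (by intro r u hg; rw [PySem.Dict.get?_empty] at hg; cases hg)
      (by intro u hc; rw [PySem.Dict.contains_empty] at hc; cases hc)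
    rcases hrel with ⟨M', T', hA, hB, hTkeys, hMlen⟩ | ⟨hA, hB⟩
    · rw [hA, hB]
      have hks : ∀ (d : PySem.Dict (Int × Int) (Int × Int)), d.keys.length = d.size := by
        intro d
        simp [PySem.Dict.keys, PySem.Dict.size]
      simp only [List.nil_append] at hTkeys hMlen
      simp only [Option.isSome_some]
      rw [decide_eq_true_eq]
      constructor
      · rw [← hks T', hTkeys]
      · rw [← hks M', hMlen]
        exact hlen1
    · rw [hA, hB]
      rfl
  · rfl
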